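-- pv_equiv track=rewrite | github.com/simjh96/spring_cooler | dual_priority_que.py | solution
-- ===== SOURCE A (Python) =====
-- import heapq
--
-- def solution(operations):
--
--     inputs = []
--     input_counter = 0
--     min_heap = []
--     max_heap = []
--     counter = 0
--
--     for op_idx in range(len(operations)):
--         # input
--         if operations[op_idx][0] == "I":
--
--             inp = int(operations[op_idx][2:])
--             counter += 1
--
--             inputs.append(inp)
--             heapq.heappush(min_heap, (inp, input_counter))
--             heapq.heappush(max_heap, (-inp, input_counter))
--             input_counter += 1
--
--         if operations[op_idx][0] == "D":
--             if counter:
--                 counter -= 1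
--
--                 # del min
--                 if operations[op_idx][2] == "-":
--                     # delete pre_deleted
--                     pre_deleted = True
--
--                     while pre_deleted:
--                         if inputs[min_heap[0][1]] is None:
--                             heapq.heappop(min_heap)
--                         else:
--                             pre_deleted = False
--
--                     _, del_idx = heapq.heappop(min_heap)
--                     inputs[del_idx] = None
--                 # del max
--                 else:
--                     # delete pre_deleted
--                     pre_deleted = True
--
--                     while pre_deleted:
--                         if inputs[max_heap[0][1]] is None:
--                             heapq.heappop(max_heap)
--                         else:
--                             pre_deleted = False
--
--                     _, del_idx = heapq.heappop(max_heap)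
--                     inputs[del_idx] = None
--
--     answer_arr = [_ for _ in inputs if _ is not None]
--     if len(answer_arr):
--         return [max(answer_arr), min(answer_arr)]
--     else:
--         return [0,0]
-- ===== SOURCE B (Python) =====
-- def solution(operations):
--     live = []
--     for op in operations:
--         if op.startswith("I"):
--             live.append(int(op[2:]))
--         elif op.startswith("D") and live:
--             target = min(live) if op[2] == "-" else max(live)
--             live.remove(target)
--     return [max(live), min(live)] if live else [0, 0]
-- ===== Notes on version B (the rewrite author's own statement) =====
-- stated objective: simpler
-- what changed: Replaces A's two heaps with (value, insertion-counter) pairs, lazy deletion against a None-marked inputs array and a separate live counter by a single plain list that appends on insert and removes one occurrence of min/max on delete; the final [max, min] depends only on the surviving values.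
-- outside the precondition, e.g. on solution(['I 1', 'D -', 'D']): A returns [0, 0], B returns [0, 0]
import Mathlib
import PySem

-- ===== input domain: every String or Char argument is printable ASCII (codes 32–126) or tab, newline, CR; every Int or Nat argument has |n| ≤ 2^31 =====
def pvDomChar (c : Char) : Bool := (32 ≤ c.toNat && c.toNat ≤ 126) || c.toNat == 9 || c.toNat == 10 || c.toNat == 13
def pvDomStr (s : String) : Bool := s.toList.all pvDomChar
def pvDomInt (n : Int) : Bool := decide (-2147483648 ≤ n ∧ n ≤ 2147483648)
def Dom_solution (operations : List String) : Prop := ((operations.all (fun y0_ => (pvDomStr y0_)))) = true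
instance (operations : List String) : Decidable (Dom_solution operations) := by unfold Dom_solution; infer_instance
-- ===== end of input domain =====

-- B replaces A's two heaps with lazy deletion by a single list scanned for min/max;
-- equivalence of the RETURN value is proved (A mutates nothing the caller sees).

-- ===== PORT A =====
-- heapq's heap of (value, counter) pairs is modelled as the multiset of its entries
-- (a list): heappush appends, heap[0] / heappop read and remove the lexicographic
-- minimum — exactly the pairs heapq exposes at those operations.
def pairLe (p q : Int × Int) : Bool :=
  decide (p.1 < q.1) || (decide (p.1 = q.1) && decide (p.2 ≤ q.2))

def hMin : List (Int × Int) → Option (Int × Int)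
  | [] => none
  | x :: xs =>
    match hMin xs with
    | none => some x
    | some m => if pairLe x m then some x else some m

-- A's `while pre_deleted` loop: pop stale pairs (slot in `inputs` is None), then pop
-- the live minimum.  fuel = current heap size bounds the loop (each pass erases one
-- entry); the fuel-0 / empty-heap answers are Python's IndexError path, never reached
-- while a live entry exists.
def popLoop (inputs : List (Option Int)) : Nat → List (Int × Int) → (Int × Int) × List (Int × Int)
  | 0, h => ((0, 0), h)
  | fuel + 1, h =>
    match hMin h with
    | none => ((0, 0), h)
    | some m =>
      match PySem.List.pyGet? inputs m.2 with
      | some (some _) => (m, h.erase m)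
      | _ => popLoop inputs fuel (h.erase m)

structure AState where
  inputs : List (Option Int)
  inputCounter : Int
  minHeap : List (Int × Int)
  maxHeap : List (Int × Int)
  counter : Int

def stepA (st : AState) (op : String) : AState :=
  let s := op.toList
  let st1 :=
    if PySem.List.pyGet? s 0 = some 'I' then
      -- int(op[2:]); Python raises ValueError when the parse fails (outside Pre_)
      let inp := (PySem.Int.ofChars? (PySem.List.slice s (some 2) none)).getD 0
      { inputs := st.inputs ++ [some inp]
        inputCounter := st.inputCounter + 1
        minHeap := st.minHeap ++ [(inp, st.inputCounter)]
        maxHeap := st.maxHeap ++ [(-inp, st.inputCounter)]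
        counter := st.counter + 1 }
    else st
  if PySem.List.pyGet? s 0 = some 'D' then
    if st1.counter ≠ 0 then
      -- op[2]: IndexError on shorter ops (outside Pre_)
      if PySem.List.pyGet? s 2 = some '-' then
        let r := popLoop st1.inputs st1.minHeap.length st1.minHeap
        { st1 with inputs := PySem.List.pySetD st1.inputs r.1.2 none
                   minHeap := r.2
                   counter := st1.counter - 1 }
      else
        let r := popLoop st1.inputs st1.maxHeap.length st1.maxHeap
        { st1 with inputs := PySem.List.pySetD st1.inputs r.1.2 none
                   maxHeap := r.2
                   counter := st1.counter - 1 }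
    else st1
  else st1

def solution (operations : List String) : List Int :=
  let st := operations.foldl stepA ⟨[], 0, [], [], 0⟩
  let answer := st.inputs.filterMap id
  if answer.length ≠ 0 then
    [(PySem.List.max? answer (fun x => x)).getD 0, (PySem.List.min? answer (fun x => x)).getD 0]
  else [0, 0]

-- ===== PORT B =====
def stepB (live : List Int) (op : String) : List Int :=
  let s := op.toList
  if PySem.Chars.startswith s ['I'] then
    live ++ [(PySem.Int.ofChars? (PySem.List.slice s (some 2) none)).getD 0]
  else if PySem.Chars.startswith s ['D'] && !live.isEmpty then
    let target :=
      if PySem.List.pyGet? s 2 = some '-' then (PySem.List.min? live (fun x => x)).getD 0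
      else (PySem.List.max? live (fun x => x)).getD 0
    (PySem.List.remove? live target).getD live
  else live

def solution_alt (operations : List String) : List Int :=
  let live := operations.foldl stepB []
  if live.isEmpty then [0, 0]
  else [(PySem.List.max? live (fun x => x)).getD 0, (PySem.List.min? live (fun x => x)).getD 0]

-- ===== PRECONDITION & SPEC =====
-- Pre_ excludes exactly the op lists on which A raises: an empty op (IndexError at
-- op[0]), an 'I' op whose tail is not an int literal (ValueError at int(op[2:])), and
-- a 'D' op shorter than 3 characters once an 'I' op has occurred earlier in the list
-- (op[2] may then raise IndexError; whether it is reached depends on the runtime queue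
-- state, so this last clause conservatively excludes some inputs on which the queue
-- happens to be empty and A skips the access and returns).  `preScan` is a syntactic
-- scan of the op strings (tracking only whether an 'I' op has been seen), not a replay
-- of the algorithm.
def preOpCore (s : List Char) : Bool :=
  !s.isEmpty &&
  (if s[0]? = some 'I' then (PySem.Int.ofChars? (PySem.List.slice s (some 2) none)).isSome else true)

def preScan : List String → Bool → Bool
  | [], _ => true
  | op :: rest, seenI =>
    preOpCore op.toList &&
    (if op.toList[0]? = some 'D' && seenI then decide (3 ≤ op.toList.length) else true) &&
    preScan rest (seenI || op.toList[0]? == some 'I')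

def Pre_solution (operations : List String) : Prop :=
  preScan operations false = true

instance (operations : List String) : Decidable (Pre_solution operations) := by
  unfold Pre_solution; infer_instance

def pvWitness_solution : List String := ["I 3", "I 1", "D -", "I 2", "D +", "X"]

def Spec_solution (operations : List String) (out : List Int) : Prop := out = solution_alt operations
instance (operations : List String) (out : List Int) : Decidable (Spec_solution operations out) := by
  unfold Spec_solution; infer_instance

-- ===== CLAIM (what is proved, stated in full; the proofs are below) =====
def Claim_equal_solution : Prop := ∀ (operations : List String), Dom_solution operations → Pre_solution operations → Spec_solution operations (solution operations)

-- ===== LEMMAS AND PROOFS =====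

theorem pairLe_iff (p q : Int × Int) : pairLe p q = true ↔ (p.1 < q.1 ∨ (p.1 = q.1 ∧ p.2 ≤ q.2)) := by
  simp [pairLe]

theorem pairLe_refl (p : Int × Int) : pairLe p p = true := by simp [pairLe_iff]

theorem pairLe_total {p q : Int × Int} (h : ¬ pairLe p q = true) : pairLe q p = true := by
  rw [pairLe_iff] at *; omega

theorem pairLe_trans {p q r : Int × Int} (h1 : pairLe p q = true) (h2 : pairLe q r = true) :
    pairLe p r = true := by
  rw [pairLe_iff] at *; omega

theorem hMin_eq_none_iff (h : List (Int × Int)) : hMin h = none ↔ h = [] := by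
  cases h with
  | nil => simp [hMin]
  | cons x xs =>
    simp only [hMin]
    rcases hmx : hMin xs with _ | m
    · simp
    · simp only []
      split <;> simp

theorem hMin_mem {h : List (Int × Int)} {m : Int × Int} (hm : hMin h = some m) : m ∈ h := by
  induction h generalizing m with
  | nil => simp [hMin] at hm
  | cons x xs ih =>
    simp only [hMin] at hm
    rcases hmx : hMin xs with _ | m'
    · rw [hmx] at hm; simp at hm; simp [hm]
    · simp [hmx] at hm
      split at hm
      · simp at hm; simp [hm]
      · simp at hm; subst hm; exact List.mem_cons_of_mem _ (ih hmx)

theorem hMin_le {h : List (Int × Int)} {m : Int × Int} (hm : hMin h = some m) :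
    ∀ p ∈ h, pairLe m p = true := by
  induction h generalizing m with
  | nil => simp [hMin] at hm
  | cons x xs ih =>
    simp only [hMin] at hm
    intro p hp
    rcases hmx : hMin xs with _ | m'
    · rw [hmx] at hm; simp at hm; subst hm
      rw [hMin_eq_none_iff] at hmx; subst hmx
      simp at hp; subst hp; exact pairLe_refl _
    · simp [hmx] at hm
      rcases List.mem_cons.mp hp with hp | hp
      · subst hp
        split at hm
        · simp at hm; subst hm; exact pairLe_refl _
        · rename_i hcond; simp at hm; subst hm; exact pairLe_total hcond
      · split at hm
        · rename_i hcond; simp at hm; subst hm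
          exact pairLe_trans hcond (ih hmx p hp)
        · simp at hm; subst hm; exact ih hmx p hp

-- full behaviour of A's lazy-deletion pop, given the heap invariant; `dec` decodes the
-- stored priority to the stored value (id for the min-heap, negation for the max-heap)
theorem popLoop_spec (inputs : List (Option Int)) (dec : Int → Int) :
    ∀ (fuel : Nat) (h : List (Int × Int)),
    h.length ≤ fuel →
    (∀ p ∈ h, 0 ≤ p.2 ∧ (inputs[p.2.toNat]? = some none ∨ inputs[p.2.toNat]? = some (some (dec p.1)))) →
    (∃ p ∈ h, inputs[p.2.toNat]? = some (some (dec p.1))) →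
    0 ≤ (popLoop inputs fuel h).1.2 ∧
    inputs[(popLoop inputs fuel h).1.2.toNat]? = some (some (dec (popLoop inputs fuel h).1.1)) ∧
    (∀ p ∈ h, inputs[p.2.toNat]? ≠ some none → pairLe (popLoop inputs fuel h).1 p = true) ∧
    (∀ p ∈ h, p ≠ (popLoop inputs fuel h).1 → inputs[p.2.toNat]? ≠ some none → p ∈ (popLoop inputs fuel h).2) ∧
    (∀ p ∈ (popLoop inputs fuel h).2, p ∈ h) := by
  intro fuel
  induction fuel with
  | zero =>
    intro h hlen _ hne
    have : h = [] := List.length_eq_zero_iff.mp (by omega)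
    subst this; simp at hne
  | succ fuel ih =>
    intro h hlen hw hne
    obtain ⟨p0, hp0, hlive0⟩ := hne
    have hnenil : h ≠ [] := by rintro rfl; simp at hp0
    obtain ⟨m0, hm0⟩ : ∃ m0, hMin h = some m0 := by
      rcases hx : hMin h with _ | m0
      · exact absurd ((hMin_eq_none_iff h).mp hx) hnenil
      · exact ⟨m0, rfl⟩
    have hm0mem : m0 ∈ h := hMin_mem hm0
    have hm0le : ∀ p ∈ h, pairLe m0 p = true := hMin_le hm0
    have hm0pos : 0 ≤ m0.2 := (hw m0 hm0mem).1
    have hget : PySem.List.pyGet? inputs m0.2 = inputs[m0.2.toNat]? := by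
      exact PySem.List.pyGet?_of_nonneg inputs hm0pos
    rcases (hw m0 hm0mem).2 with hstale | hlivem
    · -- m0 is stale: it is popped and the loop continues
      have hstep : popLoop inputs (fuel + 1) h = popLoop inputs fuel (h.erase m0) := by
        simp only [popLoop, hm0, hget, hstale]
      have hm0ne : m0 ≠ p0 := by
        intro he; rw [he] at hstale; rw [hstale] at hlive0; simp at hlive0
      have hlen' : (h.erase m0).length ≤ fuel := by
        have := List.length_erase_of_mem hm0mem
        omega
      have hw' : ∀ p ∈ h.erase m0, 0 ≤ p.2 ∧ (inputs[p.2.toNat]? = some none ∨ inputs[p.2.toNat]? = some (some (dec p.1))) :=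
        fun p hp => hw p (List.mem_of_mem_erase hp)
      have hne' : ∃ p ∈ h.erase m0, inputs[p.2.toNat]? = some (some (dec p.1)) :=
        ⟨p0, (List.mem_erase_of_ne (fun he => hm0ne he.symm)).mpr hp0, hlive0⟩
      obtain ⟨c1, c2, c3, c4, c5⟩ := ih (h.erase m0) hlen' hw' hne'
      rw [hstep]
      refine ⟨c1, c2, ?_, ?_, ?_⟩
      · intro p hp hns
        by_cases hpe : p = m0
        · subst hpe; rw [hstale] at hns; simp at hns
        · exact c3 p ((List.mem_erase_of_ne hpe).mpr hp) hns
      · intro p hp hpne hns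
        by_cases hpe : p = m0
        · subst hpe; rw [hstale] at hns; simp at hns
        · exact c4 p ((List.mem_erase_of_ne hpe).mpr hp) hpne hns
      · intro p hp
        exact List.mem_of_mem_erase (c5 p hp)
    · -- m0 is live: it is the result
      have hstep : popLoop inputs (fuel + 1) h = (m0, h.erase m0) := by
        simp only [popLoop, hm0, hget, hlivem]
      rw [hstep]
      refine ⟨hm0pos, hlivem, fun p hp _ => hm0le p hp, ?_, fun p hp => List.mem_of_mem_erase hp⟩
      intro p hp hpne _
      exact (List.mem_erase_of_ne hpne).mpr hp

-- joint invariant tying A's state to B's list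
structure JInv (st : AState) (live : List Int) : Prop where
  hlive : live = st.inputs.filterMap id
  hic : st.inputCounter = (st.inputs.length : Int)
  hcnt : st.counter = (live.length : Int)
  hmin : ∀ (i : Nat) (v : Int), st.inputs[i]? = some (some v) → (v, (i : Int)) ∈ st.minHeap
  hmax : ∀ (i : Nat) (v : Int), st.inputs[i]? = some (some v) → (-v, (i : Int)) ∈ st.maxHeap
  hminw : ∀ p ∈ st.minHeap, 0 ≤ p.2 ∧ (st.inputs[p.2.toNat]? = some none ∨ st.inputs[p.2.toNat]? = some (some p.1))
  hmaxw : ∀ p ∈ st.maxHeap, 0 ≤ p.2 ∧ (st.inputs[p.2.toNat]? = some none ∨ st.inputs[p.2.toNat]? = some (some (-p.1)))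

-- marking slot i None in `inputs` = erasing the first occurrence of its value, when no
-- earlier live slot holds the same value
theorem set_none_filterMap :
    ∀ (inputs : List (Option Int)) (i : Nat) (v : Int),
    inputs[i]? = some (some v) →
    (∀ (j : Nat) (w : Int), j < i → inputs[j]? = some (some w) → w ≠ v) →
    (inputs.set i none).filterMap id = (inputs.filterMap id).erase v := by
  intro inputs
  induction inputs with
  | nil => intro i v hi; simp at hi
  | cons a t ih =>
    intro i v hi hearly
    cases i with
    | zero =>
      simp at hi; subst hi
      simp [List.erase_cons_head]
    | succ k =>
      simp only [List.getElem?_cons_succ] at hi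
      have hearly' : ∀ (j : Nat) (w : Int), j < k → t[j]? = some (some w) → w ≠ v := by
        intro j w hj hw
        exact hearly (j + 1) w (by omega) (by simpa using hw)
      have hw0 : ∀ w0 : Int, a = some w0 → w0 ≠ v := by
        intro w0 ha
        exact hearly 0 w0 (by omega) (by simp [ha])
      cases a with
      | none => simpa using ih k v hi hearly'
      | some w0 =>
        have : w0 ≠ v := hw0 w0 rfl
        simp only [List.set_cons_succ, List.filterMap_cons, id]
        rw [List.erase_cons_tail (by simpa using this)]
        simpa using ih k v hi hearly'

theorem startswith_single (s : List Char) (c : Char) :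
    PySem.Chars.startswith s [c] = true ↔ s[0]? = some c := by
  cases s with
  | nil => simp [PySem.Chars.startswith_iff]
  | cons a t =>
    rw [PySem.Chars.startswith_iff, List.cons_prefix_cons]
    simp [eq_comm]

theorem mem_filterMap_id (v : Int) (inputs : List (Option Int)) :
    v ∈ inputs.filterMap id ↔ ∃ i : Nat, inputs[i]? = some (some v) := by
  rw [List.mem_filterMap]
  constructor
  · rintro ⟨a, ha, hav⟩
    cases a with
    | none => simp at hav
    | some w => simp at hav; subst hav; exact List.mem_iff_getElem?.mp ha
  · rintro ⟨i, hi⟩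
    exact ⟨some v, List.mem_of_getElem? hi, rfl⟩

theorem min?_id_eq (l : List Int) (v : Int) (hv : v ∈ l) (hle : ∀ w ∈ l, v ≤ w) :
    PySem.List.min? l (fun x => x) = some v := by
  cases l with
  | nil => simp at hv
  | cons x t =>
    rw [PySem.List.min?_id_cons]
    congr 1
    have h1 := PySem.List.foldl_min_le t x
    have h2 := PySem.List.foldl_min_mem t x
    have hle' : t.foldl min x ≤ v := by
      rcases List.mem_cons.mp hv with rfl | hv
      · exact h1.1
      · exact h1.2 _ hv
    have hge : v ≤ t.foldl min x := by
      rcases h2 with h2 | h2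
      · rw [h2]; exact hle x (by simp)
      · exact hle _ (List.mem_cons_of_mem _ h2)
    omega

theorem max?_id_eq (l : List Int) (v : Int) (hv : v ∈ l) (hle : ∀ w ∈ l, w ≤ v) :
    PySem.List.max? l (fun x => x) = some v := by
  cases l with
  | nil => simp at hv
  | cons x t =>
    rw [PySem.List.max?_id_cons]
    congr 1
    have h1 := PySem.List.le_foldl_max t x
    have h2 := PySem.List.foldl_max_mem t x
    have hle' : v ≤ t.foldl max x := by
      rcases List.mem_cons.mp hv with rfl | hv
      · exact h1.1
      · exact h1.2 _ hv
    have hge : t.foldl max x ≤ v := by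
      rcases h2 with h2 | h2
      · rw [h2]; exact hle x (by simp)
      · exact hle _ (List.mem_cons_of_mem _ h2)
    omega

theorem step_preserve (st : AState) (live : List Int) (op : String)
    (hop : preOpCore op.toList = true) (h : JInv st live) :
    JInv (stepA st op) (stepB live op) := by
  simp only [preOpCore, Bool.and_eq_true, Bool.not_eq_eq_eq_not, Bool.not_true] at hop
  obtain ⟨hne, hparse⟩ := hop
  by_cases h0I : op.toList[0]? = some 'I'
  · -- insert
    rw [h0I] at hparse; simp only [] at hparse
    obtain ⟨n, hn⟩ := Option.isSome_iff_exists.mp hparse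
    have hA : stepA st op =
        ⟨st.inputs ++ [some n], st.inputCounter + 1,
         st.minHeap ++ [(n, st.inputCounter)], st.maxHeap ++ [(-n, st.inputCounter)],
         st.counter + 1⟩ := by
      simp [stepA, PySem.List.pyGet?_zero, h0I, hn]
    have hB : stepB live op = live ++ [n] := by
      simp [stepB, startswith_single, h0I, hn]
    rw [hA, hB]
    have hlen_ic : st.inputCounter = (st.inputs.length : Int) := h.hic
    refine ⟨?_, ?_, ?_, ?_, ?_, ?_, ?_⟩
    · simp [List.filterMap_append, h.hlive]
    · simp [hlen_ic]
    · have := h.hcnt; simp; omega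
    · intro i v hget
      by_cases hi : i < st.inputs.length
      · rw [List.getElem?_append_left hi] at hget
        exact List.mem_append_left _ (h.hmin i v hget)
      · rw [List.getElem?_append_right (by omega)] at hget
        have hi0 : i - st.inputs.length = 0 := by
          by_contra hc
          rw [List.getElem?_eq_none (by simp; omega)] at hget; simp at hget
        rw [hi0] at hget; simp at hget
        apply List.mem_append_right
        have : i = st.inputs.length := by
          have := List.getElem?_eq_none (l := st.inputs ++ [some n]) (i := i)
          by_contra hc
          omega
        simp [hget, this, hlen_ic]
    · intro i v hget
      by_cases hi : i < st.inputs.length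
      · rw [List.getElem?_append_left hi] at hget
        exact List.mem_append_left _ (h.hmax i v hget)
      · rw [List.getElem?_append_right (by omega)] at hget
        have hi0 : i - st.inputs.length = 0 := by
          by_contra hc
          rw [List.getElem?_eq_none (by simp; omega)] at hget; simp at hget
        rw [hi0] at hget; simp at hget
        apply List.mem_append_right
        have : i = st.inputs.length := by omega
        simp [hget, this, hlen_ic]
    · intro p hp
      rcases List.mem_append.mp hp with hp | hp
      · obtain ⟨h1, h2⟩ := h.hminw p hp
        refine ⟨h1, ?_⟩
        have hlt : p.2.toNat < st.inputs.length := by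
          rcases h2 with h2 | h2 <;>
            · by_contra hc
              rw [List.getElem?_eq_none (by omega)] at h2; simp at h2
        rw [List.getElem?_append_left hlt]
        exact h2
      · simp at hp
        subst hp
        refine ⟨by omega, Or.inr ?_⟩
        simp [hlen_ic]
    · intro p hp
      rcases List.mem_append.mp hp with hp | hp
      · obtain ⟨h1, h2⟩ := h.hmaxw p hp
        refine ⟨h1, ?_⟩
        have hlt : p.2.toNat < st.inputs.length := by
          rcases h2 with h2 | h2 <;>
            · by_contra hc
              rw [List.getElem?_eq_none (by omega)] at h2; simp at h2
        rw [List.getElem?_append_left hlt]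
        exact h2
      · simp at hp
        subst hp
        refine ⟨by omega, Or.inr ?_⟩
        simp [hlen_ic]
  · by_cases h0D : op.toList[0]? = some 'D'
    · -- delete
      by_cases hemp : live = []
      · -- empty queue: both no-ops
        have hc0 : st.counter = 0 := by rw [h.hcnt, hemp]; simp
        have hA : stepA st op = st := by
          simp [stepA, PySem.List.pyGet?_zero, h0D, hc0]
        have hB : stepB live op = live := by
          simp [stepB, startswith_single, h0D, hemp]
        rw [hA, hB]; exact h
      · have hc0 : st.counter ≠ 0 := by
          rw [h.hcnt]
          intro hc
          exact hemp (List.length_eq_zero_iff.mp (by exact_mod_cast hc))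
        by_cases hdash : PySem.List.pyGet? op.toList 2 = some '-'
        · -- delete min
          have hspec := popLoop_spec st.inputs (fun x => x) st.minHeap.length st.minHeap
            le_rfl h.hminw ?hne
          case hne =>
            obtain ⟨w, hw⟩ := List.exists_mem_of_ne_nil live hemp
            obtain ⟨j, hj⟩ := (mem_filterMap_id w st.inputs).mp (h.hlive ▸ hw)
            exact ⟨(w, (j : Int)), h.hmin j w hj, by simpa using hj⟩
          obtain ⟨c1, c2, c3, c4, c5⟩ := hspec
          set r := popLoop st.inputs st.minHeap.length st.minHeap with hr
          set i := r.1.2.toNat with hi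
          set v := r.1.1 with hv
          have hri : r.1.2 = (i : Int) := by rw [hi, Int.toNat_of_nonneg c1]
          have hvm : st.inputs[i]? = some (some v) := c2
          -- v is ≤ every live value
          have hvlow : ∀ w ∈ live, v ≤ w := by
            intro w hw
            obtain ⟨j, hj⟩ := (mem_filterMap_id w st.inputs).mp (h.hlive ▸ hw)
            have hmem := h.hmin j w hj
            have := c3 (w, (j : Int)) hmem (by simpa using hj ▸ (by simp [hj] : st.inputs[((j:Int)).toNat]? ≠ some none))
            rw [pairLe_iff] at this
            simp at this
            omega
          have hvmem : v ∈ live := h.hlive ▸ (mem_filterMap_id v st.inputs).mpr ⟨i, hvm⟩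
          have hilt : i < st.inputs.length := by
            by_contra hc
            rw [List.getElem?_eq_none (by omega)] at hvm; simp at hvm
          have hearly : ∀ (j : Nat) (w : Int), j < i → st.inputs[j]? = some (some w) → w ≠ v := by
            intro j w hj hw heq
            have hc3 := c3 (w, (j : Int)) (h.hmin j w hw) (by simp [hw])
            rw [pairLe_iff] at hc3
            simp only [hri] at hc3
            simp at hc3
            omega
          have htarget : PySem.List.min? live (fun x => x) = some v := min?_id_eq live v hvmem hvlow
          have hset : (st.inputs.set i none).filterMap id = live.erase v := by
            rw [set_none_filterMap st.inputs i v hvm hearly, h.hlive]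
          have hsetD : PySem.List.pySetD st.inputs r.1.2 none = st.inputs.set i none := by
            exact PySem.List.pySetD_of_nonneg st.inputs none c1
          have hA : stepA st op =
              { st with inputs := PySem.List.pySetD st.inputs r.1.2 none,
                        minHeap := r.2, counter := st.counter - 1 } := by
            simp [stepA, PySem.List.pyGet?_zero, h0D, hc0, hdash, hr]
          have hB : stepB live op = live.erase v := by
            have hrm : PySem.List.remove? live v = some (live.erase v) :=
              PySem.List.remove?_eq_some_erase live v hvmem
            simp [stepB, startswith_single, h0D, hemp, hdash, htarget, hrm]
          rw [hsetD] at hA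
          rw [hA, hB]
          refine ⟨hset.symm, ?_, ?_, ?_, ?_, ?_, ?_⟩
          · simpa using h.hic
          · have h1 : 0 < live.length := List.length_pos_of_mem hvmem
            simp [List.length_erase_of_mem hvmem, h.hcnt]
            omega
          · intro i' v' hget
            have hii : i' ≠ i := by
              intro he; subst he
              rw [List.getElem?_set_self hilt] at hget; simp at hget
            have hget' : st.inputs[i']? = some (some v') := by
              rwa [List.getElem?_set_ne (by omega : i ≠ i')] at hget
            refine c4 (v', (i' : Int)) (h.hmin i' v' hget') ?_ (by simp [hget'])
            intro he
            have h2 : ((i' : Int)) = r.1.2 := congrArg Prod.snd he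
            rw [hri] at h2
            exact hii (by exact_mod_cast h2)
          · intro i' v' hget
            have hii : i' ≠ i := by
              intro he; subst he
              rw [List.getElem?_set_self hilt] at hget; simp at hget
            have hget' : st.inputs[i']? = some (some v') := by
              rwa [List.getElem?_set_ne (by omega : i ≠ i')] at hget
            exact h.hmax i' v' hget'
          · intro p hp
            have hpold := h.hminw p (c5 p hp)
            refine ⟨hpold.1, ?_⟩
            by_cases hpi : p.2.toNat = i
            · rw [hpi, List.getElem?_set_self hilt]; left; rfl
            · rw [List.getElem?_set_ne (by omega : i ≠ p.2.toNat)]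
              exact hpold.2
          · intro p hp
            have hpold := h.hmaxw p hp
            refine ⟨hpold.1, ?_⟩
            by_cases hpi : p.2.toNat = i
            · rw [hpi, List.getElem?_set_self hilt]; left; rfl
            · rw [List.getElem?_set_ne (by omega : i ≠ p.2.toNat)]
              exact hpold.2
        · -- delete max
          have hspec := popLoop_spec st.inputs (fun x => -x) st.maxHeap.length st.maxHeap
            le_rfl h.hmaxw ?hne
          case hne =>
            obtain ⟨w, hw⟩ := List.exists_mem_of_ne_nil live hemp
            obtain ⟨j, hj⟩ := (mem_filterMap_id w st.inputs).mp (h.hlive ▸ hw)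
            exact ⟨(-w, (j : Int)), h.hmax j w hj, by simp [hj]⟩
          obtain ⟨c1, c2, c3, c4, c5⟩ := hspec
          set r := popLoop st.inputs st.maxHeap.length st.maxHeap with hr
          set i := r.1.2.toNat with hi
          have hri : r.1.2 = (i : Int) := by rw [hi, Int.toNat_of_nonneg c1]
          set v : Int := -r.1.1 with hv
          have hvm : st.inputs[i]? = some (some v) := c2
          have hvhigh : ∀ w ∈ live, w ≤ v := by
            intro w hw
            obtain ⟨j, hj⟩ := (mem_filterMap_id w st.inputs).mp (h.hlive ▸ hw)
            have := c3 (-w, (j : Int)) (h.hmax j w hj) (by simp [hj])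
            rw [pairLe_iff] at this
            simp at this
            omega
          have hvmem : v ∈ live := h.hlive ▸ (mem_filterMap_id v st.inputs).mpr ⟨i, hvm⟩
          have hilt : i < st.inputs.length := by
            by_contra hc
            rw [List.getElem?_eq_none (by omega)] at hvm; simp at hvm
          have hearly : ∀ (j : Nat) (w : Int), j < i → st.inputs[j]? = some (some w) → w ≠ v := by
            intro j w hj hw heq
            have hc3 := c3 (-w, (j : Int)) (h.hmax j w hw) (by simp [hw])
            rw [pairLe_iff] at hc3
            simp only [hri] at hc3
            simp at hc3
            omega
          have htarget : PySem.List.max? live (fun x => x) = some v := max?_id_eq live v hvmem hvhigh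
          have hset : (st.inputs.set i none).filterMap id = live.erase v := by
            rw [set_none_filterMap st.inputs i v hvm hearly, h.hlive]
          have hsetD : PySem.List.pySetD st.inputs r.1.2 none = st.inputs.set i none := by
            exact PySem.List.pySetD_of_nonneg st.inputs none c1
          have hA : stepA st op =
              { st with inputs := PySem.List.pySetD st.inputs r.1.2 none,
                        maxHeap := r.2, counter := st.counter - 1 } := by
            simp [stepA, PySem.List.pyGet?_zero, h0D, hc0, hdash, hr]
          have hB : stepB live op = live.erase v := by
            have hrm : PySem.List.remove? live v = some (live.erase v) :=
              PySem.List.remove?_eq_some_erase live v hvmem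
            simp [stepB, startswith_single, h0D, hemp, hdash, htarget, hrm]
          rw [hsetD] at hA
          rw [hA, hB]
          refine ⟨hset.symm, ?_, ?_, ?_, ?_, ?_, ?_⟩
          · simpa using h.hic
          · have h1 : 0 < live.length := List.length_pos_of_mem hvmem
            simp [List.length_erase_of_mem hvmem, h.hcnt]
            omega
          · intro i' v' hget
            have hii : i' ≠ i := by
              intro he; subst he
              rw [List.getElem?_set_self hilt] at hget; simp at hget
            have hget' : st.inputs[i']? = some (some v') := by
              rwa [List.getElem?_set_ne (by omega : i ≠ i')] at hget
            exact h.hmin i' v' hget'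
          · intro i' v' hget
            have hii : i' ≠ i := by
              intro he; subst he
              rw [List.getElem?_set_self hilt] at hget; simp at hget
            have hget' : st.inputs[i']? = some (some v') := by
              rwa [List.getElem?_set_ne (by omega : i ≠ i')] at hget
            refine c4 (-v', (i' : Int)) (h.hmax i' v' hget') ?_ (by simp [hget'])
            intro he
            have h2 : ((i' : Int)) = r.1.2 := congrArg Prod.snd he
            rw [hri] at h2
            exact hii (by exact_mod_cast h2)
          · intro p hp
            have hpold := h.hminw p hp
            refine ⟨hpold.1, ?_⟩
            by_cases hpi : p.2.toNat = i
            · rw [hpi, List.getElem?_set_self hilt]; left; rfl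
            · rw [List.getElem?_set_ne (by omega : i ≠ p.2.toNat)]
              exact hpold.2
          · intro p hp
            have hpold := h.hmaxw p (c5 p hp)
            refine ⟨hpold.1, ?_⟩
            by_cases hpi : p.2.toNat = i
            · rw [hpi, List.getElem?_set_self hilt]; left; rfl
            · rw [List.getElem?_set_ne (by omega : i ≠ p.2.toNat)]
              exact hpold.2
    · -- op neither I nor D: both no-ops
      have hA : stepA st op = st := by
        simp [stepA, PySem.List.pyGet?_zero, h0I, h0D]
      have hB : stepB live op = live := by
        simp [stepB, startswith_single, h0I, h0D]
      rw [hA, hB]; exact h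

theorem preScan_forall (ops : List String) : ∀ (b : Bool), preScan ops b = true →
    ∀ op ∈ ops, preOpCore op.toList = true := by
  induction ops with
  | nil => simp
  | cons o t ih =>
    intro b hb op hm
    simp only [preScan, Bool.and_eq_true] at hb
    rcases List.mem_cons.mp hm with rfl | hm
    · exact hb.1.1
    · exact ih _ hb.2 op hm

theorem fold_inv (ops : List String) (st : AState) (live : List Int)
    (hops : ∀ op ∈ ops, preOpCore op.toList = true) (h : JInv st live) :
    JInv (ops.foldl stepA st) (ops.foldl stepB live) := by
  induction ops generalizing st live with
  | nil => exact h
  | cons o t ih =>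
    exact ih _ _ (fun op hm => hops op (List.mem_cons_of_mem _ hm))
      (step_preserve _ _ _ (hops o (List.mem_cons_self)) h)

-- ===== VERDICT (by name: the statement is the Claim_ definition above) =====
theorem solution_spec : Claim_equal_solution := by
  intro operations _ hpre
  unfold Spec_solution
  simp only [solution, solution_alt]
  have hinv : JInv (operations.foldl stepA ⟨[], 0, [], [], 0⟩) (operations.foldl stepB []) := by
    apply fold_inv
    · exact preScan_forall operations false hpre
    · exact ⟨rfl, rfl, rfl, by simp, by simp, by simp, by simp⟩
  rw [← hinv.hlive]
  rcases hl : operations.foldl stepB [] with _ | ⟨x, t⟩ <;> simp
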